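-- pv_equiv track=rewrite | github.com/MoSmadi/SSRS-Report-Generator-BE | app/routers/report.py | _split_order_by_clause
-- ===== SOURCE A (Python) =====
-- from typing import Any, Dict, List, Optional, Tuple
--
-- def _split_order_by_clause(sql: str) -> tuple[str, Optional[str]]:
--     """Split off a top-level ORDER BY clause so we can wrap SQL in a derived table."""
--     lower = sql.lower()
--     depth = 0
--     in_single = False
--     in_double = False
--     in_line_comment = False
--     in_block_comment = False
--     i = 0
--     while i < len(sql):
--         ch = sql[i]
--         nxt = sql[i + 1] if i + 1 < len(sql) else ""
--
--         if in_line_comment: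
--             if ch in "\r\n":
--                 in_line_comment = False
--             i += 1
--             continue
--         if in_block_comment:
--             if ch == "*" and nxt == "/":
--                 in_block_comment = False
--                 i += 2
--                 continue
--             i += 1
--             continue
--         if ch == "-" and nxt == "-":
--             in_line_comment = True
--             i += 2
--             continue
--         if ch == "/" and nxt == "*":
--             in_block_comment = True
--             i += 2
--             continue
--
--         if ch == "'" and not in_double:
--             in_single = not in_single
--             i += 1
--             continue
--         if ch == '"' and not in_single:
--             in_double = not in_double
--             i += 1
--             continue
--         if in_single or in_double:
--             i += 1
--             continue
--         if ch == "(":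
--             depth += 1
--             i += 1
--             continue
--         if ch == ")":
--             depth = max(depth - 1, 0)
--             i += 1
--             continue
--         if depth == 0 and lower.startswith("order by", i):
--             clause = sql[i + len("order by") :].strip()
--             body = sql[:i].rstrip()
--             return body, clause
--         i += 1
--     return sql, None
-- ===== SOURCE B (Python) =====
-- from typing import Optional
--
--
-- def _split_order_by_clause(sql: str) -> tuple[str, Optional[str]]:
--     """Split off a top-level ORDER BY clause so we can wrap SQL in a derived table.
--
--     Event-driven rewrite: instead of stepping one character at a time, jump with
--     str.find from one significant position (quote, paren, comment delimiter or
--     top-level ORDER BY) to the next, skipping whole comments and quiet stretches.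
--     """
--     lower = sql.lower()
--
--     def _first(*cands: int) -> int:
--         hits = [p for p in cands if p != -1]
--         return min(hits) if hits else -1
--
--     def _after_comment(j: int) -> int:
--         # j points at '--' or '/*'; position just after the comment, -1 if unterminated
--         if sql[j] == "-":
--             k = _first(sql.find("\r", j + 2), sql.find("\n", j + 2))
--             return -1 if k == -1 else k + 1
--         k = sql.find("*/", j + 2)
--         return -1 if k == -1 else k + 2
--
--     i = 0
--     depth = 0
--     quote = ""
--     while True:
--         if quote:
--             j = _first(sql.find("--", i), sql.find("/*", i), sql.find(quote, i))
--             if j == -1: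
--                 return sql, None
--             if sql[j] == quote:
--                 quote = ""
--                 i = j + 1
--             else:
--                 i = _after_comment(j)
--                 if i == -1:
--                     return sql, None
--         else:
--             cands = [sql.find("--", i), sql.find("/*", i), sql.find("'", i),
--                      sql.find('"', i), sql.find("(", i), sql.find(")", i)]
--             if depth == 0:
--                 cands.append(lower.find("order by", i))
--             j = _first(*cands)
--             if j == -1:
--                 return sql, None
--             ch = sql[j]
--             if ch == "-" or ch == "/":
--                 i = _after_comment(j)
--                 if i == -1:
--                     return sql, None
--             elif ch == "'" or ch == '"':
--                 quote = ch
--                 i = j + 1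
--             elif ch == "(":
--                 depth += 1
--                 i = j + 1
--             elif ch == ")":
--                 depth = max(depth - 1, 0)
--                 i = j + 1
--             else:
--                 return sql[:j].rstrip(), sql[j + 8:].strip()
-- ===== Notes on version B (the rewrite author's own statement) =====
-- stated objective: faster
-- what changed: Replaces the per-character state-machine loop by event-driven jumping: str.find locates the next significant position (comment start, quote, paren, or top-level ORDER BY), whole comments and quiet stretches are skipped in one jump instead of one character at a time.
import Mathlib
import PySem

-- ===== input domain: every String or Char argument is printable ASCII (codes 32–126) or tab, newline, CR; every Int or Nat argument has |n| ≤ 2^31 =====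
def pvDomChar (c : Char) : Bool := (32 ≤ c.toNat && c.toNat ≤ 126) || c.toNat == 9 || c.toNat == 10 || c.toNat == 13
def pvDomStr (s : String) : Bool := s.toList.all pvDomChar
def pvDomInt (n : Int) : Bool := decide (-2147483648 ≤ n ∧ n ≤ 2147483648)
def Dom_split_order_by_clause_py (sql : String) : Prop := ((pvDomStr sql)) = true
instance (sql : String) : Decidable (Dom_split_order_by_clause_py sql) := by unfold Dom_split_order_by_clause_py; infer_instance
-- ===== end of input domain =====

-- B replaces A's per-character state machine by event-driven str.find jumps over whole
-- comments and quiet stretches (measurably faster by a constant factor in Python).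

-- ===== PORT A =====
-- the while-loop of A: state (i, depth, in_single, in_double, in_line_comment, in_block_comment)
def loopA (s lw : List Char) (i : Nat) (depth : Int)
    (inS inD inLC inBC : Bool) : List Char × Option (List Char) :=
  if h : i < s.length then
    let ch := s[i]
    let nxt : Option Char := s[i+1]?          -- Python's nxt, "" rendered as none
    if inLC then
      if ch == '\r' || ch == '\n' then loopA s lw (i+1) depth inS inD false inBC
      else loopA s lw (i+1) depth inS inD true inBC
    else if inBC then
      if ch == '*' && nxt == some '/' then loopA s lw (i+2) depth inS inD inLC false
      else loopA s lw (i+1) depth inS inD inLC true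
    else if ch == '-' && nxt == some '-' then loopA s lw (i+2) depth inS inD true inBC
    else if ch == '/' && nxt == some '*' then loopA s lw (i+2) depth inS inD inLC true
    else if ch == '\'' && !inD then loopA s lw (i+1) depth (!inS) inD inLC inBC
    else if ch == '"' && !inS then loopA s lw (i+1) depth inS (!inD) inLC inBC
    else if inS || inD then loopA s lw (i+1) depth inS inD inLC inBC
    else if ch == '(' then loopA s lw (i+1) (depth+1) inS inD inLC inBC
    else if ch == ')' then loopA s lw (i+1) (max (depth-1) 0) inS inD inLC inBC
    else if depth == 0 && PySem.Chars.startswith (lw.drop i) "order by".toList then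
      (PySem.Chars.rstrip (s.take i), some (PySem.Chars.strip (s.drop (i+8))))
    else loopA s lw (i+1) depth inS inD inLC inBC
  else (s, none)
termination_by s.length - i
decreasing_by all_goals omega

def split_order_by_clause_py (sql : String) : String × Option String :=
  let s := sql.toList
  let lw := PySem.Chars.lower s
  let r := loopA s lw 0 0 false false false false
  (String.mk r.1, r.2.map String.mk)

-- ===== PORT B =====
-- Source B's _first(*cands)
def firstHit (cands : List Int) : Int :=
  let hits := cands.filter (fun p => p != -1)
  match PySem.List.min? hits (fun x => x) with
  | some m => m
  | none => -1

-- Source B's _after_comment(j)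
def afterComment (s : List Char) (j : Int) : Int :=
  if PySem.List.pyGetD s j ' ' == '-' then
    let k := firstHit [PySem.Chars.findFrom s ['\r'] (j+2), PySem.Chars.findFrom s ['\n'] (j+2)]
    if k == -1 then -1 else k + 1
  else
    let k := PySem.Chars.findFrom s ['*','/'] (j+2)
    if k == -1 then -1 else k + 2

-- Source B's while-True loop; fuel only makes recursion structural (never exhausted from the wrapper)
def loopB (s lw : List Char) : Nat → Int → Int → Option Char → List Char × Option (List Char)
  | 0, _, _, _ => (s, none)
  | fuel + 1, i, depth, some q =>
      let j := firstHit [PySem.Chars.findFrom s ['-','-'] i, PySem.Chars.findFrom s ['/','*'] i,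
                         PySem.Chars.findFrom s [q] i]
      if j == -1 then (s, none)
      else if PySem.List.pyGetD s j ' ' == q then loopB s lw fuel (j+1) depth none
      else
        let i' := afterComment s j
        if i' == -1 then (s, none) else loopB s lw fuel i' depth (some q)
  | fuel + 1, i, depth, none =>
      let base := [PySem.Chars.findFrom s ['-','-'] i, PySem.Chars.findFrom s ['/','*'] i,
                   PySem.Chars.findFrom s ['\''] i, PySem.Chars.findFrom s ['"'] i,
                   PySem.Chars.findFrom s ['('] i, PySem.Chars.findFrom s [')'] i]
      let cands := if depth == 0 then base ++ [PySem.Chars.findFrom lw "order by".toList i] else base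
      let j := firstHit cands
      if j == -1 then (s, none)
      else
        let ch := PySem.List.pyGetD s j ' '
        if ch == '-' || ch == '/' then
          let i' := afterComment s j
          if i' == -1 then (s, none) else loopB s lw fuel i' depth none
        else if ch == '\'' || ch == '"' then loopB s lw fuel (j+1) depth (some ch)
        else if ch == '(' then loopB s lw fuel (j+1) (depth+1) none
        else if ch == ')' then loopB s lw fuel (j+1) (max (depth-1) 0) none
        else (PySem.Chars.rstrip (PySem.List.slice s none (some j)),
              some (PySem.Chars.strip (PySem.List.slice s (some (j+8)) none)))

def split_order_by_clause_py_alt (sql : String) : String × Option String :=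
  let s := sql.toList
  let lw := PySem.Chars.lower s
  let r := loopB s lw (s.length + 2) 0 0 none
  (String.mk r.1, r.2.map String.mk)

-- ===== PRECONDITION & SPEC =====
def Spec_split_order_by_clause_py (sql : String) (out : String × Option String) : Prop := out = split_order_by_clause_py_alt sql
instance (sql : String) (out : String × Option String) : Decidable (Spec_split_order_by_clause_py sql out) := by unfold Spec_split_order_by_clause_py; infer_instance

-- ===== CLAIM (what is proved, stated in full; the proofs are below) =====
def Claim_equal_split_order_by_clause_py : Prop := ∀ (sql : String), Dom_split_order_by_clause_py sql → Spec_split_order_by_clause_py sql (split_order_by_clause_py sql)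

-- ===== LEMMAS AND PROOFS =====

-- a subpattern hit at position p: c.2 occurs in c.1 starting at p
def HitAt (c : List Char × List Char) (p : Nat) : Prop := c.2 <+: c.1.drop p

lemma prefix_one {s : List Char} {c : Char} {p : Nat} :
    [c] <+: s.drop p ↔ ∃ h : p < s.length, s[p] = c := by
  constructor
  · rintro ⟨t, ht⟩
    have hlt : p < s.length := by
      by_contra h
      have : s.drop p = [] := List.drop_eq_nil_of_le (by omega)
      rw [this] at ht; simp at ht
    refine ⟨hlt, ?_⟩
    have := List.drop_eq_getElem_cons hlt
    rw [this] at ht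
    exact (List.cons.injEq _ _ _ _).mp ht |>.1.symm
  · rintro ⟨h, rfl⟩
    rw [List.drop_eq_getElem_cons h]
    exact ⟨s.drop (p+1), rfl⟩

lemma prefix_two {s : List Char} {a b : Char} {p : Nat} :
    [a, b] <+: s.drop p ↔ ∃ h : p + 1 < s.length, s[p] = a ∧ s[p+1] = b := by
  constructor
  · rintro ⟨t, ht⟩
    have hlen : 2 ≤ (s.drop p).length := by rw [← ht]; simp
    have hlt : p + 1 < s.length := by simp at hlen; omega
    have h1 := List.drop_eq_getElem_cons (l := s) (i := p) (by omega)
    have h2 := List.drop_eq_getElem_cons (l := s) (i := p+1) (by omega)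
    rw [h1, h2] at ht
    obtain ⟨e1, e2, -⟩ := List.cons_eq_cons.mp ht |>.imp id (fun h => List.cons_eq_cons.mp h)
    exact ⟨hlt, e1.symm, e2.symm⟩
  · rintro ⟨h, rfl, rfl⟩
    rw [List.drop_eq_getElem_cons (by omega : p < s.length),
        List.drop_eq_getElem_cons (by omega : p + 1 < s.length)]
    exact ⟨s.drop (p+2), rfl⟩

lemma hit_infix {c : List Char × List Char} {k p : Nat} (hkp : k ≤ p) (h : HitAt c p) :
    c.2 <:+: c.1.drop k := by
  have : c.1.drop p = (c.1.drop k).drop (p - k) := by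
    rw [List.drop_drop]; congr 1; omega
  rw [HitAt, this] at h
  exact h.isInfix.trans (List.drop_suffix _ _).isInfix

-- Source B's _first over a batch of finds started at k: either no pattern occurs at or after k,
-- or it returns the least position ≥ k where some pattern occurs
lemma firstHit_spec (cands : List (List Char × List Char)) (k : Nat)
    (hk : ∀ c ∈ cands, k ≤ c.1.length) :
    (firstHit (cands.map (fun c => PySem.Chars.findFrom c.1 c.2 ↑k)) = -1 ∧
        ∀ p, k ≤ p → ∀ c ∈ cands, ¬ HitAt c p) ∨
    (∃ m : Nat, firstHit (cands.map (fun c => PySem.Chars.findFrom c.1 c.2 ↑k)) = ↑m ∧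
        k ≤ m ∧ (∃ c ∈ cands, HitAt c m) ∧
        ∀ p, k ≤ p → p < m → ∀ c ∈ cands, ¬ HitAt c p) := by
  set f : (List Char × List Char) → Int := fun c => PySem.Chars.findFrom c.1 c.2 ↑k with hf
  set cs := cands.map f with hcs
  set hits := cs.filter (fun p => p != -1) with hhits
  rcases hmin : PySem.List.min? hits (fun x => x) with _ | m
  · left
    have hnil : hits = [] := (PySem.List.min?_eq_none_iff _ _).mp hmin
    constructor
    · simp [firstHit, ← hhits, hmin]
    · intro p hp c hc hhit
      have hfc : f c = -1 := by
        by_contra hne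
        have : f c ∈ hits := by
          rw [hhits]; apply List.mem_filter.mpr
          exact ⟨List.mem_map_of_mem hc, by simpa using hne⟩
        simp [hnil] at this
      have := (PySem.Chars.findFrom_natCast_eq_neg_one_iff c.1 c.2 k (hk c hc)).mp hfc
      exact this (hit_infix hp hhit)
  · right
    have hfh : firstHit cs = m := by simp [firstHit, ← hhits, hmin]
    have hmem : m ∈ hits := PySem.List.min?_mem hmin
    have hmin' : ∀ y ∈ hits, m ≤ y := by
      intro y hy; exact PySem.List.min?_isMin hmin y hy
    obtain ⟨hmcs, hmne⟩ := List.mem_filter.mp hmem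
    obtain ⟨c0, hc0, hfc0⟩ := List.mem_map.mp hmcs
    have hmne' : f c0 ≠ -1 := by rw [hfc0]; simpa using hmne
    obtain ⟨hkm, hpre, hminc0⟩ :=
      PySem.Chars.findFrom_natCast_spec c0.1 c0.2 k (hk c0 hc0) hmne'
    have h0m : (0:Int) ≤ m := by rw [← hfc0]; exact le_trans (by positivity) hkm
    have heq : PySem.Chars.findFrom c0.1 c0.2 ↑k = m := hfc0
    refine ⟨m.toNat, ?_, ?_, ⟨c0, hc0, ?_⟩, ?_⟩
    · rw [hfh]; omega
    · rw [heq] at hkm; omega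
    · have he : (PySem.Chars.findFrom c0.1 c0.2 ↑k).toNat = m.toNat := by rw [heq]
      rw [HitAt, ← he]; exact hpre
    · intro p hp hpm c hc hhit
      have hinf : c.2 <:+: c.1.drop k := hit_infix hp hhit
      have hfcne : f c ≠ -1 := by
        intro h
        exact (PySem.Chars.findFrom_natCast_eq_neg_one_iff c.1 c.2 k (hk c hc)).mp h hinf
      have hfchits : f c ∈ hits := by
        rw [hhits]; apply List.mem_filter.mpr
        exact ⟨List.mem_map_of_mem hc, by simpa using hfcne⟩
      have hmle : m ≤ PySem.Chars.findFrom c.1 c.2 ↑k := hmin' _ hfchits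
      obtain ⟨hkfc, -, hmincc⟩ :=
        PySem.Chars.findFrom_natCast_spec c.1 c.2 k (hk c hc) hfcne
      have hnp : ¬ (p < (PySem.Chars.findFrom c.1 c.2 ↑k).toNat) := fun hlt => hmincc p hp hlt hhit
      omega

-- the event predicates matching loopB's candidate lists
def codeEvent (s lw : List Char) (depth : Int) (p : Nat) : Prop :=
  ['-','-'] <+: s.drop p ∨ ['/','*'] <+: s.drop p ∨ ['\''] <+: s.drop p ∨
  ['"'] <+: s.drop p ∨ ['('] <+: s.drop p ∨ [')'] <+: s.drop p ∨
  (depth = 0 ∧ "order by".toList <+: lw.drop p)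

def quoteEvent (s : List Char) (q : Char) (p : Nat) : Prop :=
  ['-','-'] <+: s.drop p ∨ ['/','*'] <+: s.drop p ∨ [q] <+: s.drop p

-- single silent steps of A in each mode
lemma loopA_step_code (s lw : List Char) (depth : Int) (i : Nat) (hi : i < s.length)
    (hnoev : ¬ codeEvent s lw depth i) :
    loopA s lw i depth false false false false = loopA s lw (i+1) depth false false false false := by
  rw [loopA, dif_pos hi]
  simp only [Bool.false_eq_true, if_false, Bool.or_self, Bool.not_false, Bool.and_true]
  split_ifs with h1 h2 h3 h4 h5 h6 h7
  · simp only [Bool.and_eq_true, beq_iff_eq, List.getElem?_eq_some_iff] at h1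
    obtain ⟨e1, h2, e2⟩ := h1
    exact absurd (Or.inl (prefix_two.mpr ⟨h2, e1, e2⟩)) hnoev
  · simp only [Bool.and_eq_true, beq_iff_eq, List.getElem?_eq_some_iff] at h2
    obtain ⟨e1, h, e2⟩ := h2
    exact absurd (Or.inr (Or.inl (prefix_two.mpr ⟨h, e1, e2⟩))) hnoev
  · simp only [beq_iff_eq] at h3
    exact absurd (Or.inr (Or.inr (Or.inl (prefix_one.mpr ⟨hi, h3⟩)))) hnoev
  · simp only [beq_iff_eq] at h4
    exact absurd (Or.inr (Or.inr (Or.inr (Or.inl (prefix_one.mpr ⟨hi, h4⟩))))) hnoev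
  · simp only [beq_iff_eq] at h5
    exact absurd (Or.inr (Or.inr (Or.inr (Or.inr (Or.inl (prefix_one.mpr ⟨hi, h5⟩)))))) hnoev
  · simp only [beq_iff_eq] at h6
    exact absurd (Or.inr (Or.inr (Or.inr (Or.inr (Or.inr (Or.inl (prefix_one.mpr ⟨hi, h6⟩))))))) hnoev
  · simp only [Bool.and_eq_true, beq_iff_eq, PySem.Chars.startswith_iff] at h7
    exact absurd (Or.inr (Or.inr (Or.inr (Or.inr (Or.inr (Or.inr h7)))))) hnoev
  · rfl

lemma loopA_step_squote (s lw : List Char) (depth : Int) (i : Nat) (hi : i < s.length)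
    (hnoev : ¬ quoteEvent s '\'' i) :
    loopA s lw i depth true false false false = loopA s lw (i+1) depth true false false false := by
  rw [loopA, dif_pos hi]
  simp only [Bool.false_eq_true, if_false, Bool.not_false, Bool.and_true, Bool.not_true,
    Bool.and_false, Bool.true_or, if_true]
  split_ifs with h1 h2 h3
  · simp only [Bool.and_eq_true, beq_iff_eq, List.getElem?_eq_some_iff] at h1
    obtain ⟨e1, h, e2⟩ := h1
    exact absurd (Or.inl (prefix_two.mpr ⟨h, e1, e2⟩)) hnoev
  · simp only [Bool.and_eq_true, beq_iff_eq, List.getElem?_eq_some_iff] at h2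
    obtain ⟨e1, h, e2⟩ := h2
    exact absurd (Or.inr (Or.inl (prefix_two.mpr ⟨h, e1, e2⟩))) hnoev
  · simp only [beq_iff_eq] at h3
    exact absurd (Or.inr (Or.inr (prefix_one.mpr ⟨hi, h3⟩))) hnoev
  · rfl

lemma loopA_step_dquote (s lw : List Char) (depth : Int) (i : Nat) (hi : i < s.length)
    (hnoev : ¬ quoteEvent s '"' i) :
    loopA s lw i depth false true false false = loopA s lw (i+1) depth false true false false := by
  rw [loopA, dif_pos hi]
  simp only [Bool.false_eq_true, if_false, Bool.not_true, Bool.and_false, Bool.not_false,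
    Bool.and_true, Bool.or_true, if_true]
  split_ifs with h1 h2 h3
  · simp only [Bool.and_eq_true, beq_iff_eq, List.getElem?_eq_some_iff] at h1
    obtain ⟨e1, h, e2⟩ := h1
    exact absurd (Or.inl (prefix_two.mpr ⟨h, e1, e2⟩)) hnoev
  · simp only [Bool.and_eq_true, beq_iff_eq, List.getElem?_eq_some_iff] at h2
    obtain ⟨e1, h, e2⟩ := h2
    exact absurd (Or.inr (Or.inl (prefix_two.mpr ⟨h, e1, e2⟩))) hnoev
  · simp only [beq_iff_eq] at h3
    exact absurd (Or.inr (Or.inr (prefix_one.mpr ⟨hi, h3⟩))) hnoev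
  · rfl

lemma loopA_step_line (s lw : List Char) (depth : Int) (inS inD : Bool) (i : Nat)
    (hi : i < s.length) (hnoev : ¬ (s[i] = '\r' ∨ s[i] = '\n')) :
    loopA s lw i depth inS inD true false = loopA s lw (i+1) depth inS inD true false := by
  rw [loopA, dif_pos hi]
  simp only [if_true]
  split_ifs with h1
  · simp only [Bool.or_eq_true, beq_iff_eq] at h1
    exact absurd h1 hnoev
  · rfl

lemma loopA_step_block (s lw : List Char) (depth : Int) (inS inD : Bool) (i : Nat)
    (hi : i < s.length) (hnoev : ¬ ['*','/'] <+: s.drop i) :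
    loopA s lw i depth inS inD false true = loopA s lw (i+1) depth inS inD false true := by
  rw [loopA, dif_pos hi]
  simp only [Bool.false_eq_true, if_false, if_true]
  split_ifs with h1
  · simp only [Bool.and_eq_true, beq_iff_eq, List.getElem?_eq_some_iff] at h1
    obtain ⟨e1, h, e2⟩ := h1
    exact absurd (prefix_two.mpr ⟨h, e1, e2⟩) hnoev
  · rfl

-- the skip lemmas: A walks silently across an event-free stretch
lemma A_skip_code (s lw : List Char) (depth : Int) :
    ∀ (d i : Nat), i + d ≤ s.length →
    (∀ p, i ≤ p → p < i + d → ¬ codeEvent s lw depth p) →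
    loopA s lw i depth false false false false = loopA s lw (i + d) depth false false false false := by
  intro d
  induction d with
  | zero => intro i _ _; rfl
  | succ d ih =>
    intro i hj hev
    rw [loopA_step_code s lw depth i (by omega) (hev i le_rfl (by omega)),
        show i + (d+1) = (i+1) + d by omega]
    exact ih (i+1) (by omega) (fun p hp1 hp2 => hev p (by omega) (by omega))

lemma A_skip_squote (s lw : List Char) (depth : Int) :
    ∀ (d i : Nat), i + d ≤ s.length →
    (∀ p, i ≤ p → p < i + d → ¬ quoteEvent s '\'' p) →
    loopA s lw i depth true false false false = loopA s lw (i + d) depth true false false false := by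
  intro d
  induction d with
  | zero => intro i _ _; rfl
  | succ d ih =>
    intro i hj hev
    rw [loopA_step_squote s lw depth i (by omega) (hev i le_rfl (by omega)),
        show i + (d+1) = (i+1) + d by omega]
    exact ih (i+1) (by omega) (fun p hp1 hp2 => hev p (by omega) (by omega))

lemma A_skip_dquote (s lw : List Char) (depth : Int) :
    ∀ (d i : Nat), i + d ≤ s.length →
    (∀ p, i ≤ p → p < i + d → ¬ quoteEvent s '"' p) →
    loopA s lw i depth false true false false = loopA s lw (i + d) depth false true false false := by
  intro d
  induction d with
  | zero => intro i _ _; rfl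
  | succ d ih =>
    intro i hj hev
    rw [loopA_step_dquote s lw depth i (by omega) (hev i le_rfl (by omega)),
        show i + (d+1) = (i+1) + d by omega]
    exact ih (i+1) (by omega) (fun p hp1 hp2 => hev p (by omega) (by omega))

lemma A_skip_line (s lw : List Char) (depth : Int) (inS inD : Bool) :
    ∀ (d i : Nat), i + d ≤ s.length →
    (∀ p, (h : p < s.length) → i ≤ p → p < i + d → ¬ (s[p] = '\r' ∨ s[p] = '\n')) →
    loopA s lw i depth inS inD true false = loopA s lw (i + d) depth inS inD true false := by
  intro d
  induction d with
  | zero => intro i _ _; rfl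
  | succ d ih =>
    intro i hj hev
    rw [loopA_step_line s lw depth inS inD i (by omega) (hev i (by omega) le_rfl (by omega)),
        show i + (d+1) = (i+1) + d by omega]
    exact ih (i+1) (by omega) (fun p h hp1 hp2 => hev p h (by omega) (by omega))

lemma A_skip_block (s lw : List Char) (depth : Int) (inS inD : Bool) :
    ∀ (d i : Nat), i + d ≤ s.length →
    (∀ p, i ≤ p → p < i + d → ¬ ['*','/'] <+: s.drop p) →
    loopA s lw i depth inS inD false true = loopA s lw (i + d) depth inS inD false true := by
  intro d
  induction d with
  | zero => intro i _ _; rfl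
  | succ d ih =>
    intro i hj hev
    rw [loopA_step_block s lw depth inS inD i (by omega) (hev i le_rfl (by omega)),
        show i + (d+1) = (i+1) + d by omega]
    exact ih (i+1) (by omega) (fun p hp1 hp2 => hev p (by omega) (by omega))

-- single event steps of A
lemma loopA_enter_line (s lw : List Char) (depth : Int) (inS inD : Bool) (i : Nat)
    (h2 : i + 1 < s.length) (e1 : s[i] = '-') (e2 : s[i+1] = '-') :
    loopA s lw i depth inS inD false false = loopA s lw (i+2) depth inS inD true false := by
  rw [loopA, dif_pos (by omega : i < s.length)]
  simp [e1, e2, List.getElem?_eq_getElem h2]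

lemma loopA_enter_block (s lw : List Char) (depth : Int) (inS inD : Bool) (i : Nat)
    (h2 : i + 1 < s.length) (e1 : s[i] = '/') (e2 : s[i+1] = '*') :
    loopA s lw i depth inS inD false false = loopA s lw (i+2) depth inS inD false true := by
  rw [loopA, dif_pos (by omega : i < s.length)]
  simp [e1, e2, List.getElem?_eq_getElem h2]

lemma loopA_exit_line (s lw : List Char) (depth : Int) (inS inD : Bool) (i : Nat)
    (hi : i < s.length) (e : s[i] = '\r' ∨ s[i] = '\n') :
    loopA s lw i depth inS inD true false = loopA s lw (i+1) depth inS inD false false := by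
  rw [loopA, dif_pos hi]
  rcases e with e | e <;> simp [e]

lemma loopA_exit_block (s lw : List Char) (depth : Int) (inS inD : Bool) (i : Nat)
    (h2 : i + 1 < s.length) (e1 : s[i] = '*') (e2 : s[i+1] = '/') :
    loopA s lw i depth inS inD false true = loopA s lw (i+2) depth inS inD false false := by
  rw [loopA, dif_pos (by omega : i < s.length)]
  simp [e1, e2, List.getElem?_eq_getElem h2]

lemma loopA_toggle_squote (s lw : List Char) (depth : Int) (inS : Bool) (i : Nat)
    (hi : i < s.length) (e : s[i] = '\'') :
    loopA s lw i depth inS false false false = loopA s lw (i+1) depth (!inS) false false false := by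
  rw [loopA, dif_pos hi]
  simp [e]

lemma loopA_toggle_dquote (s lw : List Char) (depth : Int) (inD : Bool) (i : Nat)
    (hi : i < s.length) (e : s[i] = '"') :
    loopA s lw i depth false inD false false = loopA s lw (i+1) depth false (!inD) false false := by
  rw [loopA, dif_pos hi]
  simp [e]

lemma loopA_lparen (s lw : List Char) (depth : Int) (i : Nat)
    (hi : i < s.length) (e : s[i] = '(') :
    loopA s lw i depth false false false false
      = loopA s lw (i+1) (depth+1) false false false false := by
  rw [loopA, dif_pos hi]
  simp [e]

lemma loopA_rparen (s lw : List Char) (depth : Int) (i : Nat)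
    (hi : i < s.length) (e : s[i] = ')') :
    loopA s lw i depth false false false false
      = loopA s lw (i+1) (max (depth-1) 0) false false false false := by
  rw [loopA, dif_pos hi]
  simp [e]

lemma loopA_orderby (s lw : List Char) (depth : Int) (i : Nat)
    (hi : i < s.length) (hd : depth = 0)
    (hsw : "order by".toList <+: lw.drop i)
    (hne : s[i] ≠ '-' ∧ s[i] ≠ '/' ∧ s[i] ≠ '\'' ∧ s[i] ≠ '"' ∧ s[i] ≠ '(' ∧ s[i] ≠ ')') :
    loopA s lw i depth false false false false
      = (PySem.Chars.rstrip (s.take i), some (PySem.Chars.strip (s.drop (i+8)))) := by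
  rw [loopA, dif_pos hi]
  obtain ⟨n1, n2, n3, n4, n5, n6⟩ := hne
  have hsw' : PySem.Chars.startswith (lw.drop i) "order by".toList = true :=
    (PySem.Chars.startswith_iff _ _).mpr hsw
  simp only [Bool.false_eq_true, if_false, Bool.or_self, Bool.not_false, Bool.and_true, hd,
    hsw', Bool.and_true, beq_self_eq_true]
  split_ifs with h1 h2 h3 h4 h5 h6
  · simp only [Bool.and_eq_true, beq_iff_eq] at h1; exact absurd h1.1 n1
  · simp only [Bool.and_eq_true, beq_iff_eq] at h2; exact absurd h2.1 n2
  · simp only [beq_iff_eq] at h3; exact absurd h3 n3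
  · simp only [beq_iff_eq] at h4; exact absurd h4 n4
  · simp only [beq_iff_eq] at h5; exact absurd h5 n5
  · simp only [beq_iff_eq] at h6; exact absurd h6 n6
  · rfl

-- the candidate batches of loopB, as (haystack, pattern) pairs
def candsP (s lw : List Char) (depth : Int) : List (List Char × List Char) :=
  [(s, ['-','-']), (s, ['/','*']), (s, ['\'']), (s, ['"']), (s, ['(']), (s, [')'])] ++
    (if depth = 0 then [(lw, "order by".toList)] else [])

def candsQ (s : List Char) (q : Char) : List (List Char × List Char) :=
  [(s, ['-','-']), (s, ['/','*']), (s, [q])]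

lemma noHit_code {s lw : List Char} {depth : Int} {p : Nat}
    (h : ∀ c ∈ candsP s lw depth, ¬ HitAt c p) : ¬ codeEvent s lw depth p := by
  rintro (hv | hv | hv | hv | hv | hv | ⟨hd, hv⟩)
  · exact h (s, ['-','-']) (by simp [candsP]) hv
  · exact h (s, ['/','*']) (by simp [candsP]) hv
  · exact h (s, ['\'']) (by simp [candsP]) hv
  · exact h (s, ['"']) (by simp [candsP]) hv
  · exact h (s, ['(']) (by simp [candsP]) hv
  · exact h (s, [')']) (by simp [candsP]) hv
  · exact h (lw, "order by".toList) (by simp [candsP, hd]) hv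

lemma noHit_quote {s : List Char} {q : Char} {p : Nat}
    (h : ∀ c ∈ candsQ s q, ¬ HitAt c p) : ¬ quoteEvent s q p := by
  rintro (hv | hv | hv)
  · exact h (s, ['-','-']) (by simp [candsQ]) hv
  · exact h (s, ['/','*']) (by simp [candsQ]) hv
  · exact h (s, [q]) (by simp [candsQ]) hv

def lineTerm (s : List Char) (p : Nat) : Prop := ['\r'] <+: s.drop p ∨ ['\n'] <+: s.drop p

lemma lineTerm_char {s : List Char} {p : Nat} (h : lineTerm s p) :
    ∃ hp : p < s.length, (s[p] = '\r' ∨ s[p] = '\n') := by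
  rcases h with h | h <;> obtain ⟨hp, e⟩ := prefix_one.mp h
  · exact ⟨hp, Or.inl e⟩
  · exact ⟨hp, Or.inr e⟩

lemma not_lineTerm_char {s : List Char} {p : Nat} (h : ¬ lineTerm s p) (hp : p < s.length) :
    ¬ (s[p] = '\r' ∨ s[p] = '\n') := by
  rintro (e | e)
  · exact h (Or.inl (prefix_one.mpr ⟨hp, e⟩))
  · exact h (Or.inr (prefix_one.mpr ⟨hp, e⟩))

-- Source B's _after_comment on a line comment: -1 with no terminator, else one past the first one
lemma afterComment_line (s : List Char) (m : Nat) (hm2 : m + 1 < s.length)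
    (e1 : s[m]'(by omega) = '-') :
    (afterComment s ↑m = -1 ∧ ∀ p, m+2 ≤ p → ¬ lineTerm s p) ∨
    (∃ t : Nat, afterComment s ↑m = ↑(t+1) ∧ m+2 ≤ t ∧ t < s.length ∧ lineTerm s t ∧
       ∀ p, m+2 ≤ p → p < t → ¬ lineTerm s p) := by
  have hget : PySem.List.pyGetD s (↑m) ' ' = s[m]'(by omega) := by
    simp [List.getD_eq_getElem?_getD, List.getElem?_eq_getElem (by omega : m < s.length)]
  have hcast : ((↑m : Int) + 2) = ↑(m + 2) := by push_cast; ring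
  have hspec := firstHit_spec [(s, ['\r']), (s, ['\n'])] (m+2)
    (by intro c hc; simp [List.mem_cons] at hc; rcases hc with rfl | rfl <;> simp <;> omega)
  rw [afterComment, hget, e1]
  simp only [beq_self_eq_true, if_true]
  rw [hcast]
  rcases hspec with ⟨hm1, hno⟩ | ⟨t, hm1, htge, ⟨c, hc, hhit⟩, hmin⟩
  · left
    simp only [List.map_cons, List.map_nil] at hm1
    refine ⟨by rw [hm1]; rfl, ?_⟩
    intro p hp hterm
    rcases hterm with h | h
    · exact hno p hp (s, ['\r']) (by simp) h
    · exact hno p hp (s, ['\n']) (by simp) h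
  · right
    simp only [List.map_cons, List.map_nil] at hm1
    have hterm : lineTerm s t := by
      simp [List.mem_cons] at hc
      rcases hc with rfl | rfl
      · exact Or.inl hhit
      · exact Or.inr hhit
    have htlt : t < s.length := by
      obtain ⟨hp, -⟩ := lineTerm_char hterm; exact hp
    refine ⟨t, ?_, htge, htlt, hterm, ?_⟩
    · rw [hm1]
      have : ((↑t : Int) == -1) = false := by simp
      rw [this]
      simp only [Bool.false_eq_true, if_false]
      push_cast; ring
    · intro p hp hpt hterm'
      rcases hterm' with h | h
      · exact hmin p hp hpt (s, ['\r']) (by simp) h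
      · exact hmin p hp hpt (s, ['\n']) (by simp) h

-- Source B's _after_comment on a block comment: -1 if unterminated, else two past the first "*/"
lemma afterComment_block (s : List Char) (m : Nat) (hm2 : m + 1 < s.length)
    (e1 : s[m]'(by omega) = '/') :
    (afterComment s ↑m = -1 ∧ ∀ p, m+2 ≤ p → ¬ ['*','/'] <+: s.drop p) ∨
    (∃ t : Nat, afterComment s ↑m = ↑(t+2) ∧ m+2 ≤ t ∧ ['*','/'] <+: s.drop t ∧
       ∀ p, m+2 ≤ p → p < t → ¬ ['*','/'] <+: s.drop p) := by
  have hget : PySem.List.pyGetD s (↑m) ' ' = s[m]'(by omega) := by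
    simp [List.getD_eq_getElem?_getD, List.getElem?_eq_getElem (by omega : m < s.length)]
  have hcast : ((↑m : Int) + 2) = ↑(m + 2) := by push_cast; ring
  have hne : (s[m]'(by omega) == '-') = false := by rw [e1]; rfl
  rw [afterComment, hget, hne]
  simp only [Bool.false_eq_true, if_false]
  rw [hcast]
  have hk : m + 2 ≤ s.length := by omega
  by_cases hff : PySem.Chars.findFrom s ['*','/'] ↑(m+2) = -1
  · left
    refine ⟨by rw [hff]; rfl, ?_⟩
    intro p hp hpre
    exact (PySem.Chars.findFrom_natCast_eq_neg_one_iff s ['*','/'] (m+2) hk).mp hff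
      (hit_infix (c := (s, ['*','/'])) hp hpre)
  · right
    obtain ⟨hge, hpre, hmin⟩ := PySem.Chars.findFrom_natCast_spec s ['*','/'] (m+2) hk hff
    set v := PySem.Chars.findFrom s ['*','/'] ↑(m+2) with hv
    refine ⟨v.toNat, ?_, by omega, hpre, ?_⟩
    · have hvne : (v == -1) = false := by simp [hff]
      rw [hvne]
      simp only [Bool.false_eq_true, if_false]
      omega
    · intro p hp hpt hpre'
      exact hmin p hp hpt hpre'

lemma loopA_end (s lw : List Char) (depth : Int) (inS inD inLC inBC : Bool) :
    loopA s lw s.length depth inS inD inLC inBC = (s, none) := by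
  rw [loopA]; simp

-- A across a whole line comment
lemma A_line_to_end (s lw : List Char) (depth : Int) (inS inD : Bool) (m : Nat)
    (hm2 : m + 1 < s.length) (e1 : s[m]'(by omega) = '-') (e2 : s[m+1] = '-')
    (hno : ∀ p, m+2 ≤ p → ¬ lineTerm s p) :
    loopA s lw m depth inS inD false false = (s, none) := by
  rw [loopA_enter_line s lw depth inS inD m hm2 e1 e2,
      A_skip_line s lw depth inS inD (s.length - (m+2)) (m+2) (by omega)
        (fun p h hp1 _ => not_lineTerm_char (hno p hp1) h),
      show m + 2 + (s.length - (m+2)) = s.length by omega, loopA_end]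

lemma A_line_to (s lw : List Char) (depth : Int) (inS inD : Bool) (m t : Nat)
    (hm2 : m + 1 < s.length) (e1 : s[m]'(by omega) = '-') (e2 : s[m+1] = '-')
    (hmt : m+2 ≤ t) (htt : lineTerm s t)
    (hno : ∀ p, m+2 ≤ p → p < t → ¬ lineTerm s p) :
    loopA s lw m depth inS inD false false = loopA s lw (t+1) depth inS inD false false := by
  obtain ⟨htlt, hc⟩ := lineTerm_char htt
  rw [loopA_enter_line s lw depth inS inD m hm2 e1 e2,
      A_skip_line s lw depth inS inD (t - (m+2)) (m+2) (by omega)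
        (fun p h hp1 hp2 => not_lineTerm_char (hno p hp1 (by omega)) h),
      show m + 2 + (t - (m+2)) = t by omega,
      loopA_exit_line s lw depth inS inD t htlt hc]

-- A across a whole block comment
lemma A_block_to_end (s lw : List Char) (depth : Int) (inS inD : Bool) (m : Nat)
    (hm2 : m + 1 < s.length) (e1 : s[m]'(by omega) = '/') (e2 : s[m+1] = '*')
    (hno : ∀ p, m+2 ≤ p → ¬ ['*','/'] <+: s.drop p) :
    loopA s lw m depth inS inD false false = (s, none) := by
  rw [loopA_enter_block s lw depth inS inD m hm2 e1 e2,
      A_skip_block s lw depth inS inD (s.length - (m+2)) (m+2) (by omega)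
        (fun p hp1 _ => hno p hp1),
      show m + 2 + (s.length - (m+2)) = s.length by omega, loopA_end]

lemma A_block_to (s lw : List Char) (depth : Int) (inS inD : Bool) (m t : Nat)
    (hm2 : m + 1 < s.length) (e1 : s[m]'(by omega) = '/') (e2 : s[m+1] = '*')
    (hmt : m+2 ≤ t) (htt : ['*','/'] <+: s.drop t)
    (hno : ∀ p, m+2 ≤ p → p < t → ¬ ['*','/'] <+: s.drop p) :
    loopA s lw m depth inS inD false false = loopA s lw (t+2) depth inS inD false false := by
  obtain ⟨ht2, f1, f2⟩ := prefix_two.mp htt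
  rw [loopA_enter_block s lw depth inS inD m hm2 e1 e2,
      A_skip_block s lw depth inS inD (t - (m+2)) (m+2) (by omega)
        (fun p hp1 hp2 => hno p hp1 (by omega)),
      show m + 2 + (t - (m+2)) = t by omega,
      loopA_exit_block s lw depth inS inD t ht2 f1 f2]

lemma main_lemma_proof (s lw : List Char) (hlw : lw.length = s.length)
    (hlow : ∀ (p : Nat) (h : p < s.length), lw[p] = PySem.Chars.lowerChar s[p]) :
    ∀ (fuel i : Nat) (depth : Int) (q : Option Char),
    (q = none ∨ q = some '\'' ∨ q = some '"') →
    i ≤ s.length → s.length + 1 ≤ i + fuel →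
    loopA s lw i depth (q == some '\'') (q == some '"') false false
      = loopB s lw fuel (↑i) depth q := by
  intro fuel
  induction fuel with
  | zero => intro i depth q hq hi hf; omega
  | succ fuel ih =>
    intro i depth q hq hi hf
    rcases hq with rfl | rfl | rfl
    · -- q = none : code mode
      have hobl : ∀ c ∈ candsP s lw depth, i ≤ c.1.length := by
        intro c hc
        rcases List.mem_append.mp hc with hc | hc
        · simp only [List.mem_cons, List.not_mem_nil, or_false] at hc
          rcases hc with rfl|rfl|rfl|rfl|rfl|rfl <;> simpa using hi
        · split_ifs at hc with hd
          · simp only [List.mem_singleton] at hc; subst hc; simpa [hlw] using hi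
          · simp at hc
      have hcand : (if (depth == 0) = true then
            [PySem.Chars.findFrom s ['-','-'] ↑i, PySem.Chars.findFrom s ['/','*'] ↑i,
             PySem.Chars.findFrom s ['\''] ↑i, PySem.Chars.findFrom s ['"'] ↑i,
             PySem.Chars.findFrom s ['('] ↑i, PySem.Chars.findFrom s [')'] ↑i]
              ++ [PySem.Chars.findFrom lw "order by".toList ↑i]
          else
            [PySem.Chars.findFrom s ['-','-'] ↑i, PySem.Chars.findFrom s ['/','*'] ↑i,
             PySem.Chars.findFrom s ['\''] ↑i, PySem.Chars.findFrom s ['"'] ↑i,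
             PySem.Chars.findFrom s ['('] ↑i, PySem.Chars.findFrom s [')'] ↑i])
          = (candsP s lw depth).map (fun c => PySem.Chars.findFrom c.1 c.2 ↑i) := by
        by_cases hd : depth = 0 <;> simp [candsP, hd]
      show loopA s lw i depth false false false false = _
      rw [loopB]
      simp only []
      rw [hcand]
      rcases firstHit_spec (candsP s lw depth) i hobl with ⟨hm1, hno⟩ |
        ⟨m, hm1, him, ⟨c, hc, hhit⟩, hmin⟩
      · rw [hm1]
        simp only [BEq.rfl, if_true]
        rw [A_skip_code s lw depth (s.length - i) i (by omega)
              (fun p hp1 _ => noHit_code (fun c hc => hno p hp1 c hc)),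
            show i + (s.length - i) = s.length by omega, loopA_end]
      · rw [hm1]
        have hmne : ((↑m : Int) == -1) = false := by simp
        rw [hmne]
        simp only [Bool.false_eq_true, if_false]
        have hskipf : ∀ p, i ≤ p → p < i + (m - i) → ¬ codeEvent s lw depth p :=
          fun p hp1 hp2 => noHit_code (fun c' hc' => hmin p hp1 (by omega) c' hc')
        rcases List.mem_append.mp hc with hcb | hco
        · simp only [List.mem_cons, List.not_mem_nil, or_false] at hcb
          rcases hcb with rfl|rfl|rfl|rfl|rfl|rfl
          · -- "--" : line comment
            replace hhit : ['-','-'] <+: s.drop m := hhit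
            obtain ⟨hm2, e1, e2⟩ := prefix_two.mp hhit
            have hget : PySem.List.pyGetD s (↑m) ' ' = s[m]'(by omega) := by
              simp [List.getD_eq_getElem?_getD, List.getElem?_eq_getElem (by omega : m < s.length)]
            rw [A_skip_code s lw depth (m - i) i (by omega) hskipf,
                show i + (m - i) = m by omega, hget, e1]
            simp only [beq_self_eq_true, Bool.true_or, if_true]
            rcases afterComment_line s m hm2 e1 with ⟨hA, hno2⟩ | ⟨t, hA, htge, htlt, htt, hno2⟩
            · rw [hA]
              simp only [BEq.rfl, if_true]
              exact A_line_to_end s lw depth false false m hm2 e1 e2 hno2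
            · rw [hA, beq_eq_false_iff_ne.mpr (by omega : ((↑(t+1) : Int)) ≠ -1)]
              simp only [Bool.false_eq_true, if_false]
              rw [A_line_to s lw depth false false m t hm2 e1 e2 htge htt hno2]
              exact ih (t+1) depth none (Or.inl rfl) (by omega) (by omega)
          · -- "/*" : block comment
            replace hhit : ['/','*'] <+: s.drop m := hhit
            obtain ⟨hm2, e1, e2⟩ := prefix_two.mp hhit
            have hget : PySem.List.pyGetD s (↑m) ' ' = s[m]'(by omega) := by
              simp [List.getD_eq_getElem?_getD, List.getElem?_eq_getElem (by omega : m < s.length)]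
            rw [A_skip_code s lw depth (m - i) i (by omega) hskipf,
                show i + (m - i) = m by omega, hget, e1]
            simp only [show (('/' : Char) == '-') = false by decide, beq_self_eq_true,
              Bool.false_or, if_true]
            rcases afterComment_block s m hm2 e1 with ⟨hA, hno2⟩ | ⟨t, hA, htge, htt, hno2⟩
            · rw [hA]
              simp only [BEq.rfl, if_true]
              exact A_block_to_end s lw depth false false m hm2 e1 e2 hno2
            · rw [hA, beq_eq_false_iff_ne.mpr (by omega : ((↑(t+2) : Int)) ≠ -1)]
              simp only [Bool.false_eq_true, if_false]
              obtain ⟨ht2, -, -⟩ := prefix_two.mp htt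
              rw [A_block_to s lw depth false false m t hm2 e1 e2 htge htt hno2]
              exact ih (t+2) depth none (Or.inl rfl) (by omega) (by omega)
          · -- "'" : enter single quotes
            replace hhit : ['\''] <+: s.drop m := hhit
            obtain ⟨hmn, e⟩ := prefix_one.mp hhit
            have hget : PySem.List.pyGetD s (↑m) ' ' = s[m]'(by omega) := by
              simp [List.getD_eq_getElem?_getD, List.getElem?_eq_getElem (by omega : m < s.length)]
            rw [A_skip_code s lw depth (m - i) i (by omega) hskipf,
                show i + (m - i) = m by omega, hget, e]
            simp only [show (('\'' : Char) == '-') = false by decide,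
              show (('\'' : Char) == '/') = false by decide, beq_self_eq_true,
              Bool.true_or, Bool.or_self, if_false, if_true,
              Bool.false_eq_true]
            rw [loopA_toggle_squote s lw depth false m hmn e,
                show ((↑m : Int) + 1) = ↑(m+1) by push_cast; ring]
            exact ih (m+1) depth (some '\'') (Or.inr (Or.inl rfl)) (by omega) (by omega)
          · -- '"' : enter double quotes
            replace hhit : ['"'] <+: s.drop m := hhit
            obtain ⟨hmn, e⟩ := prefix_one.mp hhit
            have hget : PySem.List.pyGetD s (↑m) ' ' = s[m]'(by omega) := by
              simp [List.getD_eq_getElem?_getD, List.getElem?_eq_getElem (by omega : m < s.length)]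
            rw [A_skip_code s lw depth (m - i) i (by omega) hskipf,
                show i + (m - i) = m by omega, hget, e]
            simp only [show (('"' : Char) == '-') = false by decide,
              show (('"' : Char) == '/') = false by decide,
              show (('"' : Char) == '\'') = false by decide, beq_self_eq_true,
              Bool.or_self, if_false, if_true, Bool.false_eq_true, Bool.or_true]
            rw [loopA_toggle_dquote s lw depth false m hmn e,
                show ((↑m : Int) + 1) = ↑(m+1) by push_cast; ring]
            exact ih (m+1) depth (some '"') (Or.inr (Or.inr rfl)) (by omega) (by omega)
          · -- '(' : push depth
            replace hhit : ['('] <+: s.drop m := hhit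
            obtain ⟨hmn, e⟩ := prefix_one.mp hhit
            have hget : PySem.List.pyGetD s (↑m) ' ' = s[m]'(by omega) := by
              simp [List.getD_eq_getElem?_getD, List.getElem?_eq_getElem (by omega : m < s.length)]
            rw [A_skip_code s lw depth (m - i) i (by omega) hskipf,
                show i + (m - i) = m by omega, hget, e]
            simp only [show ((('(') : Char) == '-') = false by decide,
              show ((('(') : Char) == '/') = false by decide,
              show ((('(') : Char) == '\'') = false by decide,
              show ((('(') : Char) == '"') = false by decide, beq_self_eq_true,
              Bool.or_self, if_false, if_true, Bool.false_eq_true]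
            rw [loopA_lparen s lw depth m hmn e,
                show ((↑m : Int) + 1) = ↑(m+1) by push_cast; ring]
            exact ih (m+1) (depth+1) none (Or.inl rfl) (by omega) (by omega)
          · -- ')' : pop depth
            replace hhit : [')'] <+: s.drop m := hhit
            obtain ⟨hmn, e⟩ := prefix_one.mp hhit
            have hget : PySem.List.pyGetD s (↑m) ' ' = s[m]'(by omega) := by
              simp [List.getD_eq_getElem?_getD, List.getElem?_eq_getElem (by omega : m < s.length)]
            rw [A_skip_code s lw depth (m - i) i (by omega) hskipf,
                show i + (m - i) = m by omega, hget, e]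
            simp only [show (((')') : Char) == '-') = false by decide,
              show (((')') : Char) == '/') = false by decide,
              show (((')') : Char) == '\'') = false by decide,
              show (((')') : Char) == '"') = false by decide,
              show (((')') : Char) == '(') = false by decide, beq_self_eq_true,
              Bool.or_self, if_false, if_true, Bool.false_eq_true]
            rw [loopA_rparen s lw depth m hmn e,
                show ((↑m : Int) + 1) = ↑(m+1) by push_cast; ring]
            exact ih (m+1) (max (depth-1) 0) none (Or.inl rfl) (by omega) (by omega)
        · -- top-level ORDER BY hit
          split_ifs at hco with hd
          swap
          · simp at hco
          simp only [List.mem_singleton] at hco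
          subst hco
          replace hhit : "order by".toList <+: lw.drop m := hhit
          have hmlw : m < lw.length := by
            have hle := hhit.length_le
            have l8 : ("order by".toList).length = 8 := by decide
            rw [l8, List.length_drop] at hle
            omega
          have hmn : m < s.length := by omega
          have hget : PySem.List.pyGetD s (↑m) ' ' = s[m]'(by omega) := by
            simp [List.getD_eq_getElem?_getD, List.getElem?_eq_getElem (by omega : m < s.length)]
          have ho' : ['o'] <+: "order by".toList := by decide
          have ho : ['o'] <+: lw.drop m := ho'.trans hhit
          obtain ⟨hx, hom⟩ := prefix_one.mp ho
          have hlc : PySem.Chars.lowerChar (s[m]'(by omega)) = 'o' := by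
            rw [← hlow m hmn]; exact hom
          have hne1 : s[m]'(by omega) ≠ '-' := fun e => by rw [e] at hlc; exact absurd hlc (by decide)
          have hne2 : s[m]'(by omega) ≠ '/' := fun e => by rw [e] at hlc; exact absurd hlc (by decide)
          have hne3 : s[m]'(by omega) ≠ '\'' := fun e => by rw [e] at hlc; exact absurd hlc (by decide)
          have hne4 : s[m]'(by omega) ≠ '"' := fun e => by rw [e] at hlc; exact absurd hlc (by decide)
          have hne5 : s[m]'(by omega) ≠ '(' := fun e => by rw [e] at hlc; exact absurd hlc (by decide)
          have hne6 : s[m]'(by omega) ≠ ')' := fun e => by rw [e] at hlc; exact absurd hlc (by decide)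
          rw [A_skip_code s lw depth (m - i) i (by omega) hskipf,
              show i + (m - i) = m by omega, hget]
          simp only [beq_eq_false_iff_ne.mpr hne1, beq_eq_false_iff_ne.mpr hne2,
            beq_eq_false_iff_ne.mpr hne3, beq_eq_false_iff_ne.mpr hne4,
            beq_eq_false_iff_ne.mpr hne5, beq_eq_false_iff_ne.mpr hne6,
            Bool.or_self, Bool.false_eq_true, if_false]
          rw [loopA_orderby s lw depth m hmn hd hhit ⟨hne1, hne2, hne3, hne4, hne5, hne6⟩,
              PySem.List.slice_to s (by positivity : (0:Int) ≤ ↑m),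
              show ((↑m : Int) + 8) = ↑(m+8) by push_cast; ring,
              PySem.List.slice_from s (by positivity : (0:Int) ≤ (↑(m+8) : Int))]
          rw [show ((↑(m+8) : Int)).toNat = m + 8 by omega,
              show ((↑m : Int)).toNat = m by omega]
    · -- q = some '\'' : inside single quotes
      have hobl : ∀ c ∈ candsQ s '\'', i ≤ c.1.length := by
        intro c hc
        simp only [candsQ, List.mem_cons, List.not_mem_nil, or_false] at hc
        rcases hc with rfl | rfl | rfl <;> simpa using hi
      show loopA s lw i depth true false false false = _
      rw [loopB]
      simp only []
      have hcand : [PySem.Chars.findFrom s ['-','-'] ↑i, PySem.Chars.findFrom s ['/','*'] ↑i,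
            PySem.Chars.findFrom s ['\''] ↑i]
          = (candsQ s '\'').map (fun c => PySem.Chars.findFrom c.1 c.2 ↑i) := rfl
      rw [hcand]
      rcases firstHit_spec (candsQ s '\'') i hobl with ⟨hm1, hno⟩ |
        ⟨m, hm1, him, ⟨c, hc, hhit⟩, hmin⟩
      · rw [hm1]
        simp only [BEq.rfl, if_true]
        rw [A_skip_squote s lw depth (s.length - i) i (by omega)
              (fun p hp1 _ => noHit_quote (fun c hc => hno p hp1 c hc)),
            show i + (s.length - i) = s.length by omega, loopA_end]
      · rw [hm1, beq_eq_false_iff_ne.mpr (by omega : ((↑m : Int)) ≠ -1)]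
        simp only [Bool.false_eq_true, if_false]
        have hskipf : ∀ p, i ≤ p → p < i + (m - i) → ¬ quoteEvent s '\'' p :=
          fun p hp1 hp2 => noHit_quote (fun c' hc' => hmin p hp1 (by omega) c' hc')
        simp only [candsQ, List.mem_cons, List.not_mem_nil, or_false] at hc
        rcases hc with rfl | rfl | rfl
        · -- "--" : line comment inside the quotes
          replace hhit : ['-','-'] <+: s.drop m := hhit
          obtain ⟨hm2, e1, e2⟩ := prefix_two.mp hhit
          have hget : PySem.List.pyGetD s (↑m) ' ' = s[m]'(by omega) := by
            simp [List.getD_eq_getElem?_getD, List.getElem?_eq_getElem (by omega : m < s.length)]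
          rw [A_skip_squote s lw depth (m - i) i (by omega) hskipf,
              show i + (m - i) = m by omega, hget, e1,
              show (('-' : Char) == '\'') = false by decide]
          simp only [Bool.false_eq_true, if_false]
          rcases afterComment_line s m hm2 e1 with ⟨hA, hno2⟩ | ⟨t, hA, htge, htlt, htt, hno2⟩
          · rw [hA]
            simp only [BEq.rfl, if_true]
            exact A_line_to_end s lw depth true false m hm2 e1 e2 hno2
          · rw [hA, beq_eq_false_iff_ne.mpr (by omega : ((↑(t+1) : Int)) ≠ -1)]
            simp only [Bool.false_eq_true, if_false]
            rw [A_line_to s lw depth true false m t hm2 e1 e2 htge htt hno2]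
            exact ih (t+1) depth (some '\'') (Or.inr (Or.inl rfl)) (by omega) (by omega)
        · -- "/*" : block comment inside the quotes
          replace hhit : ['/','*'] <+: s.drop m := hhit
          obtain ⟨hm2, e1, e2⟩ := prefix_two.mp hhit
          have hget : PySem.List.pyGetD s (↑m) ' ' = s[m]'(by omega) := by
            simp [List.getD_eq_getElem?_getD, List.getElem?_eq_getElem (by omega : m < s.length)]
          rw [A_skip_squote s lw depth (m - i) i (by omega) hskipf,
              show i + (m - i) = m by omega, hget, e1,
              show (('/' : Char) == '\'') = false by decide]
          simp only [Bool.false_eq_true, if_false]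
          rcases afterComment_block s m hm2 e1 with ⟨hA, hno2⟩ | ⟨t, hA, htge, htt, hno2⟩
          · rw [hA]
            simp only [BEq.rfl, if_true]
            exact A_block_to_end s lw depth true false m hm2 e1 e2 hno2
          · rw [hA, beq_eq_false_iff_ne.mpr (by omega : ((↑(t+2) : Int)) ≠ -1)]
            simp only [Bool.false_eq_true, if_false]
            obtain ⟨ht2, -, -⟩ := prefix_two.mp htt
            rw [A_block_to s lw depth true false m t hm2 e1 e2 htge htt hno2]
            exact ih (t+2) depth (some '\'') (Or.inr (Or.inl rfl)) (by omega) (by omega)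
        · -- the closing quote
          replace hhit : ['\''] <+: s.drop m := hhit
          obtain ⟨hmn, e⟩ := prefix_one.mp hhit
          have hget : PySem.List.pyGetD s (↑m) ' ' = s[m]'(by omega) := by
            simp [List.getD_eq_getElem?_getD, List.getElem?_eq_getElem (by omega : m < s.length)]
          rw [A_skip_squote s lw depth (m - i) i (by omega) hskipf,
              show i + (m - i) = m by omega, hget, e]
          simp only [beq_self_eq_true, if_true]
          rw [loopA_toggle_squote s lw depth true m hmn e,
              show ((↑m : Int) + 1) = ↑(m+1) by push_cast; ring]
          exact ih (m+1) depth none (Or.inl rfl) (by omega) (by omega)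

    · -- q = some '"' : inside double quotes
      have hobl : ∀ c ∈ candsQ s '"', i ≤ c.1.length := by
        intro c hc
        simp only [candsQ, List.mem_cons, List.not_mem_nil, or_false] at hc
        rcases hc with rfl | rfl | rfl <;> simpa using hi
      show loopA s lw i depth false true false false = _
      rw [loopB]
      simp only []
      have hcand : [PySem.Chars.findFrom s ['-','-'] ↑i, PySem.Chars.findFrom s ['/','*'] ↑i,
            PySem.Chars.findFrom s ['"'] ↑i]
          = (candsQ s '"').map (fun c => PySem.Chars.findFrom c.1 c.2 ↑i) := rfl
      rw [hcand]
      rcases firstHit_spec (candsQ s '"') i hobl with ⟨hm1, hno⟩ |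
        ⟨m, hm1, him, ⟨c, hc, hhit⟩, hmin⟩
      · rw [hm1]
        simp only [BEq.rfl, if_true]
        rw [A_skip_dquote s lw depth (s.length - i) i (by omega)
              (fun p hp1 _ => noHit_quote (fun c hc => hno p hp1 c hc)),
            show i + (s.length - i) = s.length by omega, loopA_end]
      · rw [hm1, beq_eq_false_iff_ne.mpr (by omega : ((↑m : Int)) ≠ -1)]
        simp only [Bool.false_eq_true, if_false]
        have hskipf : ∀ p, i ≤ p → p < i + (m - i) → ¬ quoteEvent s '"' p :=
          fun p hp1 hp2 => noHit_quote (fun c' hc' => hmin p hp1 (by omega) c' hc')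
        simp only [candsQ, List.mem_cons, List.not_mem_nil, or_false] at hc
        rcases hc with rfl | rfl | rfl
        · -- "--" : line comment inside the quotes
          replace hhit : ['-','-'] <+: s.drop m := hhit
          obtain ⟨hm2, e1, e2⟩ := prefix_two.mp hhit
          have hget : PySem.List.pyGetD s (↑m) ' ' = s[m]'(by omega) := by
            simp [List.getD_eq_getElem?_getD, List.getElem?_eq_getElem (by omega : m < s.length)]
          rw [A_skip_dquote s lw depth (m - i) i (by omega) hskipf,
              show i + (m - i) = m by omega, hget, e1,
              show (('-' : Char) == '"') = false by decide]
          simp only [Bool.false_eq_true, if_false]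
          rcases afterComment_line s m hm2 e1 with ⟨hA, hno2⟩ | ⟨t, hA, htge, htlt, htt, hno2⟩
          · rw [hA]
            simp only [BEq.rfl, if_true]
            exact A_line_to_end s lw depth false true m hm2 e1 e2 hno2
          · rw [hA, beq_eq_false_iff_ne.mpr (by omega : ((↑(t+1) : Int)) ≠ -1)]
            simp only [Bool.false_eq_true, if_false]
            rw [A_line_to s lw depth false true m t hm2 e1 e2 htge htt hno2]
            exact ih (t+1) depth (some '"') (Or.inr (Or.inr rfl)) (by omega) (by omega)
        · -- "/*" : block comment inside the quotes
          replace hhit : ['/','*'] <+: s.drop m := hhit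
          obtain ⟨hm2, e1, e2⟩ := prefix_two.mp hhit
          have hget : PySem.List.pyGetD s (↑m) ' ' = s[m]'(by omega) := by
            simp [List.getD_eq_getElem?_getD, List.getElem?_eq_getElem (by omega : m < s.length)]
          rw [A_skip_dquote s lw depth (m - i) i (by omega) hskipf,
              show i + (m - i) = m by omega, hget, e1,
              show (('/' : Char) == '"') = false by decide]
          simp only [Bool.false_eq_true, if_false]
          rcases afterComment_block s m hm2 e1 with ⟨hA, hno2⟩ | ⟨t, hA, htge, htt, hno2⟩
          · rw [hA]
            simp only [BEq.rfl, if_true]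
            exact A_block_to_end s lw depth false true m hm2 e1 e2 hno2
          · rw [hA, beq_eq_false_iff_ne.mpr (by omega : ((↑(t+2) : Int)) ≠ -1)]
            simp only [Bool.false_eq_true, if_false]
            obtain ⟨ht2, -, -⟩ := prefix_two.mp htt
            rw [A_block_to s lw depth false true m t hm2 e1 e2 htge htt hno2]
            exact ih (t+2) depth (some '"') (Or.inr (Or.inr rfl)) (by omega) (by omega)
        · -- the closing quote
          replace hhit : ['"'] <+: s.drop m := hhit
          obtain ⟨hmn, e⟩ := prefix_one.mp hhit
          have hget : PySem.List.pyGetD s (↑m) ' ' = s[m]'(by omega) := by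
            simp [List.getD_eq_getElem?_getD, List.getElem?_eq_getElem (by omega : m < s.length)]
          rw [A_skip_dquote s lw depth (m - i) i (by omega) hskipf,
              show i + (m - i) = m by omega, hget, e]
          simp only [beq_self_eq_true, if_true]
          rw [loopA_toggle_dquote s lw depth true m hmn e,
              show ((↑m : Int) + 1) = ↑(m+1) by push_cast; ring]
          exact ih (m+1) depth none (Or.inl rfl) (by omega) (by omega)
-- ===== VERDICT (by name: the statement is the Claim_ definition above) =====
theorem split_order_by_clause_py_spec : Claim_equal_split_order_by_clause_py := by
  intro sql _
  unfold Spec_split_order_by_clause_py split_order_by_clause_py split_order_by_clause_py_alt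
  have h := main_lemma_proof sql.toList (PySem.Chars.lower sql.toList)
    (by simp [PySem.Chars.lower]) (by intro p hp; simp [PySem.Chars.lower])
    (sql.toList.length + 2) 0 0 none (Or.inl rfl) (by omega) (by omega)
  exact congrArg (fun r : List Char × Option (List Char) => (String.mk r.1, r.2.map String.mk)) (by simpa using h)
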